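-- pv_equiv track=rewrite | github.com/puppyone-ai/mut | mut/core/merge.py | _diff_hunks
-- ===== SOURCE A (Python) =====
-- def _diff_hunks(old: list, new: list) -> list:
--     """Compute edit hunks between old and new using LCS (SequenceMatcher).
--
--     Returns list of (old_start, old_end, new_lines) tuples.
--     Each hunk means: replace old[old_start:old_end] with new_lines.
--     """
--     from difflib import SequenceMatcher
--     sm = SequenceMatcher(None, old, new, autojunk=False)
--     hunks = []
--     for tag, i1, i2, j1, j2 in sm.get_opcodes():
--         if tag == "equal":
--             continue
--         hunks.append((i1, i2, new[j1:j2]))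
--     return hunks
-- ===== SOURCE B (Python) =====
-- def _diff_hunks(old: list, new: list) -> list:
--     """Compute edit hunks between old and new using LCS (recursive divide & conquer).
--
--     Returns list of (old_start, old_end, new_lines) tuples.
--     Each hunk means: replace old[old_start:old_end] with new_lines.
--     """
--     def longest_match(alo, ahi, blo, bhi):
--         # Brute-force scan of all end positions in lexicographic order, taking
--         # the first strict improvement (earliest maximal common run).
--         bi, bj, bk = alo, blo, 0
--         for i in range(alo, ahi):
--             for j in range(blo, bhi):
--                 if old[i] != new[j]:
--                     continue
--                 k = 1
--                 while alo <= i - k and blo <= j - k and old[i - k] == new[j - k]: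
--                     k += 1
--                 if k > bk:
--                     bi, bj, bk = i - k + 1, j - k + 1, k
--         return bi, bj, bk
--
--     def rec(alo, ahi, blo, bhi):
--         i, j, k = longest_match(alo, ahi, blo, bhi)
--         if k == 0:
--             if alo < ahi or blo < bhi:
--                 return [(alo, ahi, new[blo:bhi])]
--             return []
--         return rec(alo, i, blo, j) + rec(i + k, ahi, j + k, bhi)
--
--     return rec(0, len(old), 0, len(new))
-- ===== Notes on version B (the rewrite author's own statement) =====
-- stated objective: alternative
-- what changed: B drops difflib entirely: a divide-and-conquer recursion emits each hunk in place around the longest match, which it finds by a brute-force nested scan with backward run extension, instead of A's SequenceMatcher pipeline (b2j hash index + j2len dynamic-programming dict, explicit work queue, block sort + adjacent merge, full get_opcodes() list filtered for non-'equal' tags).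
import Mathlib
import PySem

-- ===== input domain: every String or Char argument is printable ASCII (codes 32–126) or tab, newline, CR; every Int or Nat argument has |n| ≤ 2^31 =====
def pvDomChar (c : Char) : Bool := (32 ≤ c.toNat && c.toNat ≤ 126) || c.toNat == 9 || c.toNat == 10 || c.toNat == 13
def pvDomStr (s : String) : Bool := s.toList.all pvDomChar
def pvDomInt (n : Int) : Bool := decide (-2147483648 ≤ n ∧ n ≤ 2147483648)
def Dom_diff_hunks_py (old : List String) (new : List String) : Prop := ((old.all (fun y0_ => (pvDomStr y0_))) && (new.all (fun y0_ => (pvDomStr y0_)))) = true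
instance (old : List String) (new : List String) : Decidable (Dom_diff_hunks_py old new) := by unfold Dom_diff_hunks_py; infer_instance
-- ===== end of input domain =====

-- B replaces A's SequenceMatcher pipeline (hash-indexed DP longest match, worklist of
-- regions, sort + merge of blocks, opcode list filtered for 'equal') by a direct
-- divide-and-conquer recursion that emits each hunk in place, finding the longest
-- match by a brute-force nested scan (objective: alternative algorithmic mechanism).

-- ===== PORT A =====  (transliteration of A = difflib.SequenceMatcher + A's filter loop)
-- All SequenceMatcher indices are Python ints, rendered as Int throughout; element
-- reads a[i] always happen at in-range nonnegative indices, read via pyGetD with a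
-- dummy default.

-- set_seq2: b2j.setdefault(elt, []).append(i)
def pvB2J (b : List String) : PySem.Dict String (List Int) :=
  (PySem.List.enumerate b).foldl (fun d p => d.modify p.2 [] (· ++ [p.1])) PySem.Dict.empty

-- inner loop of find_longest_match over b2j.get(a[i], []) (with 'continue'/'break')
def pvFlmInner (j2len : PySem.Dict Int Int) (i blo bhi : Int) :
    List Int → PySem.Dict Int Int → Int × Int × Int → PySem.Dict Int Int × (Int × Int × Int)
  | [], newj2len, best => (newj2len, best)
  | j :: js, newj2len, best =>
    if j < blo then pvFlmInner j2len i blo bhi js newj2len best          -- continue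
    else if bhi ≤ j then (newj2len, best)                                 -- break (j >= bhi)
    else
      let k := j2len.getD (j - 1) 0 + 1
      let newj2len' := newj2len.insert j k
      let best' := if best.2.2 < k then (i - k + 1, j - k + 1, k) else best
      pvFlmInner j2len i blo bhi js newj2len' best'

-- outer loop of find_longest_match: for i in range(alo, ahi)
def pvFlmOuter (a : List String) (b2j : PySem.Dict String (List Int)) (blo bhi : Int) :
    List Int → PySem.Dict Int Int → Int × Int × Int → Int × Int × Int
  | [], _, best => best
  | i :: is, j2len, best =>
    let r := pvFlmInner j2len i blo bhi (b2j.getD (PySem.List.pyGetD a i "") []) PySem.Dict.empty best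
    pvFlmOuter a b2j blo bhi is r.1 r.2

-- while besti > alo and bestj > blo and a[besti-1] == b[bestj-1]
def pvExtLeft (a b : List String) (alo blo : Int) (besti bestj bestsize : Int) : Int × Int × Int :=
  if h : alo < besti ∧ blo < bestj ∧
         PySem.List.pyGetD a (besti - 1) "" = PySem.List.pyGetD b (bestj - 1) "" then
    pvExtLeft a b alo blo (besti - 1) (bestj - 1) (bestsize + 1)
  else (besti, bestj, bestsize)
termination_by (besti - alo).toNat
decreasing_by omega

-- while besti+bestsize < ahi and bestj+bestsize < bhi and a[besti+bestsize] == b[bestj+bestsize]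
def pvExtRight (a b : List String) (ahi bhi : Int) (besti bestj bestsize : Int) : Int :=
  if h : besti + bestsize < ahi ∧ bestj + bestsize < bhi ∧
         PySem.List.pyGetD a (besti + bestsize) "" = PySem.List.pyGetD b (bestj + bestsize) "" then
    pvExtRight a b ahi bhi besti bestj (bestsize + 1)
  else bestsize
termination_by (ahi - besti - bestsize).toNat
decreasing_by omega

-- find_longest_match (isjunk=None so the two junk-extension whiles never fire)
def pvFindLongestMatch (a b : List String) (b2j : PySem.Dict String (List Int))
    (alo ahi blo bhi : Int) : Int × Int × Int :=
  let best := pvFlmOuter a b2j blo bhi (PySem.List.pyRange alo ahi 1) PySem.Dict.empty (alo, blo, 0)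
  let l := pvExtLeft a b alo blo best.1 best.2.1 best.2.2
  (l.1, l.2.1, pvExtRight a b ahi bhi l.1 l.2.1 l.2.2)

-- the 'while queue:' loop of get_matching_blocks; queue.pop() pops the LAST element,
-- so the queue is kept top-first (the later-pushed (i+k,…) interval sits at the head).
-- fuel = 2*len(a)+2 strictly bounds the number of iterations (each match consumes
-- ≥ 1 element of a and each iteration pops one entry), so the fuel-0 arm is unreachable.
def pvGmbLoop (a b : List String) (b2j : PySem.Dict String (List Int)) :
    Nat → List (Int × Int × Int × Int) → List (Int × Int × Int) → List (Int × Int × Int)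
  | _, [], acc => acc
  | 0, _, acc => acc
  | fuel + 1, (alo, ahi, blo, bhi) :: rest, acc =>
    let m := pvFindLongestMatch a b b2j alo ahi blo bhi
    if m.2.2 ≠ 0 then
      let q := if alo < m.1 ∧ blo < m.2.1 then (alo, m.1, blo, m.2.1) :: rest else rest
      let q' := if m.1 + m.2.2 < ahi ∧ m.2.1 + m.2.2 < bhi then
                  (m.1 + m.2.2, ahi, m.2.1 + m.2.2, bhi) :: q else q
      pvGmbLoop a b b2j fuel q' (acc ++ [m])
    else pvGmbLoop a b b2j fuel rest acc

-- the adjacent-block merge loop of get_matching_blocks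
def pvMergeAdj : List (Int × Int × Int) → Int × Int × Int → List (Int × Int × Int) → List (Int × Int × Int)
  | [], cur, acc => if cur.2.2 ≠ 0 then acc ++ [cur] else acc
  | (i2, j2, k2) :: rest, cur, acc =>
    if cur.1 + cur.2.2 = i2 ∧ cur.2.1 + cur.2.2 = j2 then
      pvMergeAdj rest (cur.1, cur.2.1, cur.2.2 + k2) acc
    else if cur.2.2 ≠ 0 then pvMergeAdj rest (i2, j2, k2) (acc ++ [cur])
    else pvMergeAdj rest (i2, j2, k2) acc

-- get_matching_blocks
def pvMatchingBlocks (a b : List String) : List (Int × Int × Int) :=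
  let blocks := pvGmbLoop a b (pvB2J b) (2 * a.length + 2)
      [(0, (a.length : Int), 0, (b.length : Int))] []
  -- matching_blocks.sort(): the blocks carry pairwise-distinct (i, j) prefixes, so the
  -- stable sort on the (i, j) tuple key equals Python's full-tuple sort
  let sorted := PySem.List.sorted2 blocks (fun t => t.1) (fun t => t.2.1)
  pvMergeAdj sorted (0, 0, 0) [] ++ [((a.length : Int), (b.length : Int), 0)]

-- one iteration of the get_opcodes() loop (state: i, j, answer)
def pvOpcodesStep (st : Int × Int × List (String × Int × Int × Int × Int)) (bl : Int × Int × Int) :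
    Int × Int × List (String × Int × Int × Int × Int) :=
  let tag : String :=
    if st.1 < bl.1 ∧ st.2.1 < bl.2.1 then "replace"
    else if st.1 < bl.1 then "delete"
    else if st.2.1 < bl.2.1 then "insert"
    else ""
  let answer := if tag ≠ "" then st.2.2 ++ [(tag, st.1, bl.1, st.2.1, bl.2.1)] else st.2.2
  let answer' := if bl.2.2 ≠ 0 then
      answer ++ [("equal", bl.1, bl.1 + bl.2.2, bl.2.1, bl.2.1 + bl.2.2)] else answer
  (bl.1 + bl.2.2, bl.2.1 + bl.2.2, answer')

-- one iteration of A's own loop over sm.get_opcodes()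
def pvHunkStep (new : List String) (hunks : List (Int × Int × List String))
    (op : String × Int × Int × Int × Int) : List (Int × Int × List String) :=
  if op.1 = "equal" then hunks
  else hunks ++ [(op.2.1, op.2.2.1,
                  PySem.List.slice new (some op.2.2.2.1) (some op.2.2.2.2))]

def diff_hunks_py (old : List String) (new : List String) : List (Int × Int × List String) :=
  let opcodes := ((pvMatchingBlocks old new).foldl pvOpcodesStep (0, 0, [])).2.2
  opcodes.foldl (pvHunkStep new) []

-- ===== PORT B =====  (transliteration of Source B)
-- the 'while alo <= i-k and blo <= j-k and old[i-k] == new[j-k]: k += 1' scan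
def pvBScan (a b : List String) (alo blo i j k : Int) : Int :=
  if h : alo ≤ i - k ∧ blo ≤ j - k ∧
         PySem.List.pyGetD a (i - k) "" = PySem.List.pyGetD b (j - k) "" then
    pvBScan a b alo blo i j (k + 1)
  else k
termination_by (j - blo - k + 1).toNat
decreasing_by omega

-- 'for j in range(blo, bhi)' of longest_match (with the char-mismatch 'continue')
def pvBruteInner (a b : List String) (alo blo i : Int) :
    List Int → Int × Int × Int → Int × Int × Int
  | [], best => best
  | j :: js, best =>
    if PySem.List.pyGetD a i "" ≠ PySem.List.pyGetD b j "" then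
      pvBruteInner a b alo blo i js best
    else
      let k := pvBScan a b alo blo i j 1
      pvBruteInner a b alo blo i js (if best.2.2 < k then (i - k + 1, j - k + 1, k) else best)

-- 'for i in range(alo, ahi)' of longest_match
def pvBruteOuter (a b : List String) (alo blo bhi : Int) :
    List Int → Int × Int × Int → Int × Int × Int
  | [], best => best
  | i :: is, best =>
    pvBruteOuter a b alo blo bhi is
      (pvBruteInner a b alo blo i (PySem.List.pyRange blo bhi 1) best)

def pvBruteMatch (a b : List String) (alo ahi blo bhi : Int) : Int × Int × Int :=
  pvBruteOuter a b alo blo bhi (PySem.List.pyRange alo ahi 1) (alo, blo, 0)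

-- the scan's result stays ≥ its start and anchored inside the window
-- (cited by pvRecHunks's decreasing_by via pvBruteMatch_ok)
theorem pvBScan_bounds (a b : List String) (alo blo i j : Int) :
    ∀ k : Int, 1 ≤ k → alo ≤ i - k + 1 → blo ≤ j - k + 1 →
      k ≤ pvBScan a b alo blo i j k ∧ alo ≤ i - pvBScan a b alo blo i j k + 1 ∧
        blo ≤ j - pvBScan a b alo blo i j k + 1 := by
  intro k h1 h2 h3
  rw [pvBScan]
  split
  · rename_i h
    have := pvBScan_bounds a b alo blo i j (k + 1) (by omega) (by omega) (by omega)
    omega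
  · omega
termination_by k => (j - blo - k + 1).toNat
decreasing_by omega

def pvOkBest (alo ahi blo bhi : Int) (best : Int × Int × Int) : Prop :=
  best = (alo, blo, 0) ∨
    (alo ≤ best.1 ∧ best.1 + best.2.2 ≤ ahi ∧ blo ≤ best.2.1 ∧
      best.2.1 + best.2.2 ≤ bhi ∧ 1 ≤ best.2.2)

theorem pvBruteInner_ok (a b : List String) (alo ahi blo bhi i : Int)
    (hi : alo ≤ i ∧ i < ahi) :
    ∀ (js : List Int) (best : Int × Int × Int), (∀ j ∈ js, blo ≤ j ∧ j < bhi) →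
      pvOkBest alo ahi blo bhi best →
      pvOkBest alo ahi blo bhi (pvBruteInner a b alo blo i js best) := by
  intro js
  induction js with
  | nil => intro best _ hb; exact hb
  | cons j js ih =>
    intro best hmem hb
    have hj := hmem j (by simp)
    simp only [pvBruteInner]
    split
    · exact ih best (fun x hx => hmem x (by simp [hx])) hb
    · refine ih _ (fun x hx => hmem x (by simp [hx])) ?_
      split
      · rcases pvBScan_bounds a b alo blo i j 1 (by omega) (by omega) (by omega) with ⟨hk1, hk2, hk3⟩
        right
        refine ⟨by omega, by simp; omega, by omega, by simp; omega, by omega⟩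
      · exact hb

theorem pvBruteOuter_ok (a b : List String) (alo ahi blo bhi : Int) :
    ∀ (is : List Int) (best : Int × Int × Int), (∀ i ∈ is, alo ≤ i ∧ i < ahi) →
      pvOkBest alo ahi blo bhi best →
      pvOkBest alo ahi blo bhi (pvBruteOuter a b alo blo bhi is best) := by
  intro is
  induction is with
  | nil => intro best _ hb; exact hb
  | cons i is ih =>
    intro best hmem hb
    simp only [pvBruteOuter]
    refine ih _ (fun x hx => hmem x (by simp [hx])) ?_
    refine pvBruteInner_ok a b alo ahi blo bhi i (hmem i (by simp)) _ best ?_ hb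
    intro j hj
    exact (PySem.List.mem_pyRange_one.mp hj)

theorem pvBruteMatch_ok (a b : List String) (alo ahi blo bhi : Int) :
    pvOkBest alo ahi blo bhi (pvBruteMatch a b alo ahi blo bhi) := by
  refine pvBruteOuter_ok a b alo ahi blo bhi _ _ ?_ (Or.inl rfl)
  intro i hi
  exact PySem.List.mem_pyRange_one.mp hi

-- the recursion of Source B's rec()
def pvRecHunks (a b : List String) (alo ahi blo bhi : Int) : List (Int × Int × List String) :=
  let m := pvBruteMatch a b alo ahi blo bhi
  if m.2.2 = 0 then
    if alo < ahi ∨ blo < bhi then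
      [(alo, ahi, PySem.List.slice b (some blo) (some bhi))]
    else []
  else
    pvRecHunks a b alo m.1 blo m.2.1 ++
      pvRecHunks a b (m.1 + m.2.2) ahi (m.2.1 + m.2.2) bhi
termination_by ((ahi - alo) + (bhi - blo)).toNat
decreasing_by
  all_goals
    rename_i hm0
    rcases pvBruteMatch_ok a b alo ahi blo bhi with h | h
    · exact absurd (by show (pvBruteMatch a b alo ahi blo bhi).2.2 = 0; rw [h]) hm0
    · omega

def diff_hunks_py_alt (old : List String) (new : List String) : List (Int × Int × List String) :=
  pvRecHunks old new 0 (old.length : Int) 0 (new.length : Int)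

-- ===== PRECONDITION & SPEC =====
def Spec_diff_hunks_py (old : List String) (new : List String) (out : List (Int × Int × List String)) : Prop := out = diff_hunks_py_alt old new
instance (old : List String) (new : List String) (out : List (Int × Int × List String)) : Decidable (Spec_diff_hunks_py old new out) := by unfold Spec_diff_hunks_py; infer_instance

-- ===== CLAIM (what is proved, stated in full; the proofs are below) =====
def Claim_equal_diff_hunks_py : Prop := ∀ (old : List String) (new : List String), Dom_diff_hunks_py old new → Spec_diff_hunks_py old new (diff_hunks_py old new)

-- ===== LEMMAS AND PROOFS =====

-- ---------- shared proof devices ----------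

-- backward run length ending at (i, j), truncated at the window's lower edges
def pvBwd (a b : List String) (alo blo i j : Int) : Int :=
  if alo ≤ i ∧ blo ≤ j ∧ PySem.List.pyGetD a i "" = PySem.List.pyGetD b j "" then
    pvBwd a b alo blo (i - 1) (j - 1) + 1
  else 0
termination_by (j - blo + 1).toNat
decreasing_by omega

theorem pvBwd_nonneg (a b : List String) (alo blo i j : Int) : 0 ≤ pvBwd a b alo blo i j := by
  by_cases h : alo ≤ i ∧ blo ≤ j ∧ PySem.List.pyGetD a i "" = PySem.List.pyGetD b j ""
  · rw [pvBwd, if_pos h]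
    have := pvBwd_nonneg a b alo blo (i - 1) (j - 1)
    omega
  · rw [pvBwd, if_neg h]
termination_by (j - blo + 1).toNat
decreasing_by omega

theorem pvBScan_eq_bwd (a b : List String) (alo blo i j : Int) :
    ∀ k : Int, pvBScan a b alo blo i j k = k + pvBwd a b alo blo (i - k) (j - k) := by
  intro k
  by_cases h : alo ≤ i - k ∧ blo ≤ j - k ∧
      PySem.List.pyGetD a (i - k) "" = PySem.List.pyGetD b (j - k) ""
  · rw [pvBScan]; rw [dif_pos h]
    rw [pvBScan_eq_bwd a b alo blo i j (k + 1)]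
    rw [show pvBwd a b alo blo (i - k) (j - k) =
          pvBwd a b alo blo (i - k - 1) (j - k - 1) + 1 by rw [pvBwd, if_pos h]]
    rw [show i - (k + 1) = i - k - 1 by ring, show j - (k + 1) = j - k - 1 by ring]
    ring
  · rw [pvBScan]; rw [dif_neg h]
    rw [show pvBwd a b alo blo (i - k) (j - k) = 0 by rw [pvBwd, if_neg h]]
    ring
termination_by k => (j - blo - k + 1).toNat
decreasing_by omega

theorem pvBwd_le (a b : List String) (alo blo : Int) :
    ∀ i j, alo ≤ i + 1 → blo ≤ j + 1 →
      pvBwd a b alo blo i j ≤ i - alo + 1 ∧ pvBwd a b alo blo i j ≤ j - blo + 1 := by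
  intro i j h1 h2
  by_cases h : alo ≤ i ∧ blo ≤ j ∧ PySem.List.pyGetD a i "" = PySem.List.pyGetD b j ""
  · rw [pvBwd, if_pos h]
    have := pvBwd_le a b alo blo (i - 1) (j - 1) (by omega) (by omega)
    omega
  · rw [pvBwd, if_neg h]
    omega
termination_by i j => (j - blo + 1).toNat
decreasing_by omega

theorem pvBwd_stop (a b : List String) (alo blo i j : Int) :
    ¬ (alo ≤ i - pvBwd a b alo blo i j ∧ blo ≤ j - pvBwd a b alo blo i j ∧
        PySem.List.pyGetD a (i - pvBwd a b alo blo i j) "" =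
          PySem.List.pyGetD b (j - pvBwd a b alo blo i j) "") := by
  by_cases h : alo ≤ i ∧ blo ≤ j ∧ PySem.List.pyGetD a i "" = PySem.List.pyGetD b j ""
  · rw [show pvBwd a b alo blo i j = pvBwd a b alo blo (i - 1) (j - 1) + 1 by
      rw [pvBwd, if_pos h]]
    have hrec := pvBwd_stop a b alo blo (i - 1) (j - 1)
    rw [show i - 1 - pvBwd a b alo blo (i - 1) (j - 1) =
          i - (pvBwd a b alo blo (i - 1) (j - 1) + 1) by ring,
        show j - 1 - pvBwd a b alo blo (i - 1) (j - 1) =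
          j - (pvBwd a b alo blo (i - 1) (j - 1) + 1) by ring] at hrec
    exact hrec
  · rw [show pvBwd a b alo blo i j = 0 by rw [pvBwd, if_neg h]]
    simpa using h
termination_by (j - blo + 1).toNat
decreasing_by omega

-- ---------- the canonical row scan both longest-match implementations compute ----------

def pvCandRow (a b : List String) (blo bhi i : Int) : List Int :=
  (PySem.List.pyRange blo bhi 1).filter
    (fun j => PySem.List.pyGetD a i "" == PySem.List.pyGetD b j "")

def pvStepC (a b : List String) (alo blo i : Int) (best : Int × Int × Int) (j : Int) :
    Int × Int × Int :=
  if best.2.2 < pvBwd a b alo blo i j then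
    (i - pvBwd a b alo blo i j + 1, j - pvBwd a b alo blo i j + 1, pvBwd a b alo blo i j)
  else best

def pvScan (a b : List String) (alo ahi blo bhi : Int) : Int × Int × Int :=
  (PySem.List.pyRange alo ahi 1).foldl
    (fun best i => (pvCandRow a b blo bhi i).foldl (pvStepC a b alo blo i) best)
    (alo, blo, 0)

-- ---------- B's brute force = the canonical scan ----------

theorem pvBruteInner_eq (a b : List String) (alo blo i : Int) (hi : alo ≤ i) :
    ∀ (js : List Int) (best : Int × Int × Int), (∀ j ∈ js, blo ≤ j) →
      pvBruteInner a b alo blo i js best =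
        (js.filter (fun j => PySem.List.pyGetD a i "" == PySem.List.pyGetD b j "")).foldl
          (pvStepC a b alo blo i) best := by
  intro js
  induction js with
  | nil => intro best _; rfl
  | cons j js ih =>
    intro best hmem
    have hj : blo ≤ j := hmem j (by simp)
    simp only [pvBruteInner, List.filter_cons]
    by_cases hc : PySem.List.pyGetD a i "" = PySem.List.pyGetD b j ""
    · have hk : pvBScan a b alo blo i j 1 = pvBwd a b alo blo i j := by
        rw [pvBScan_eq_bwd]
        rw [show pvBwd a b alo blo i j = pvBwd a b alo blo (i - 1) (j - 1) + 1 by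
          rw [pvBwd, if_pos ⟨hi, hj, hc⟩]]
        ring
      rw [if_neg (not_not_intro hc),
        if_pos (show (PySem.List.pyGetD a i "" == PySem.List.pyGetD b j "") = true by
          simpa using hc)]
      rw [ih _ (fun x hx => hmem x (by simp [hx])), List.foldl_cons]
      congr 1
      rw [hk]
      simp only [pvStepC]
    · rw [if_pos hc,
        if_neg (show ¬ (PySem.List.pyGetD a i "" == PySem.List.pyGetD b j "") = true by
          simpa using hc)]
      exact ih best (fun x hx => hmem x (by simp [hx]))

theorem pvBruteMatch_eq_scan (a b : List String) (alo ahi blo bhi : Int) :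
    pvBruteMatch a b alo ahi blo bhi = pvScan a b alo ahi blo bhi := by
  have houter : ∀ (is : List Int) (best : Int × Int × Int), (∀ i ∈ is, alo ≤ i) →
      pvBruteOuter a b alo blo bhi is best =
        is.foldl (fun best i => (pvCandRow a b blo bhi i).foldl (pvStepC a b alo blo i) best)
          best := by
    intro is
    induction is with
    | nil => intro best _; rfl
    | cons i is ih =>
      intro best hmem
      simp only [pvBruteOuter, List.foldl_cons]
      rw [pvBruteInner_eq a b alo blo i (hmem i (by simp)) _ best
        (fun j hj => (PySem.List.mem_pyRange_one.mp hj).1)]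
      exact ih _ (fun x hx => hmem x (by simp [hx]))
  unfold pvBruteMatch pvScan pvCandRow
  exact houter _ _ (fun i hi => (PySem.List.mem_pyRange_one.mp hi).1)

-- ---------- the b2j index ----------

lemma pvModifyFold_getD : ∀ (l : List (Int × String)) (d : PySem.Dict String (List Int))
    (c : String),
    (l.foldl (fun d p => d.modify p.2 [] (· ++ [p.1])) d).getD c [] =
      d.getD c [] ++ (l.filter (fun p => p.2 == c)).map (·.1) := by
  intro l
  induction l with
  | nil => intro d c; simp
  | cons p l ih =>
    intro d c
    simp only [List.foldl_cons, List.filter_cons]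
    rw [ih]
    by_cases hc : p.2 = c
    · rw [if_pos (by simpa using hc)]
      rw [PySem.Dict.getD_modify, if_pos hc.symm]
      simp [hc]
    · rw [if_neg (by simpa using hc)]
      rw [PySem.Dict.getD_modify, if_neg (fun h => hc h.symm)]

theorem pvB2J_getD (b : List String) (s : String) :
    (pvB2J b).getD s [] =
      ((PySem.List.enumerate b).filter (fun p => p.2 == s)).map (·.1) := by
  unfold pvB2J
  rw [pvModifyFold_getD]
  simp

-- ---------- A's DP longest match = the canonical scan ----------

def pvInvRow (a b : List String) (alo blo bhi r : Int) (d : PySem.Dict Int Int) : Prop :=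
  (∀ j', blo ≤ j' → j' < bhi → d.getD j' 0 = pvBwd a b alo blo r j') ∧
  (∀ j', j' < blo → d.getD j' 0 = 0)

def pvJs (a b : List String) (i : Int) : List Int :=
  (pvB2J b).getD (PySem.List.pyGetD a i "") []

lemma pvJs_pairwise (a b : List String) (i : Int) : (pvJs a b i).Pairwise (· < ·) := by
  unfold pvJs
  rw [pvB2J_getD]
  exact List.pairwise_map.mpr
    ((PySem.List.pairwise_lt_enumerate b 0).filter _)

lemma pvJs_mem (a b : List String) (i z : Int) :
    z ∈ pvJs a b i ↔
      0 ≤ z ∧ z < (b.length : Int) ∧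
        PySem.List.pyGetD b z "" = PySem.List.pyGetD a i "" := by
  unfold pvJs
  rw [pvB2J_getD]
  constructor
  · intro hz
    obtain ⟨p, hp, hpz⟩ := List.mem_map.mp hz
    obtain ⟨hpe, hps⟩ := List.mem_filter.mp hp
    obtain ⟨k, hk, hpk⟩ := (PySem.List.mem_enumerate_iff _ _ _).mp hpe
    subst hpk
    have hz' : (0 : Int) + (k : Int) = z := hpz
    have hps' : (b[k] == PySem.List.pyGetD a i "") = true := hps
    refine ⟨by omega, by omega, ?_⟩
    rw [show z = ((k : Int)) by omega, PySem.List.pyGetD_natCast,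
      List.getD_eq_getElem _ _ hk]
    exact beq_iff_eq.mp hps'
  · rintro ⟨h0, hlen, hch⟩
    have hk : z.toNat < b.length := by omega
    refine List.mem_map.mpr ⟨((0 : Int) + (z.toNat : Int), b[z.toNat]), ?_, by simp; omega⟩
    refine List.mem_filter.mpr ⟨(PySem.List.mem_enumerate_iff _ _ _).mpr ⟨z.toNat, hk, rfl⟩, ?_⟩
    show (b[z.toNat] == PySem.List.pyGetD a i "") = true
    rw [beq_iff_eq, ← hch]
    have hget : PySem.List.pyGetD b z "" = b[z.toNat] := by
      conv_lhs => rw [show z = ((z.toNat : Int)) by omega]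
      rw [PySem.List.pyGetD_natCast, List.getD_eq_getElem _ _ hk]
    exact hget.symm

lemma pvCandRow_pairwise (a b : List String) (blo bhi i : Int) :
    (pvCandRow a b blo bhi i).Pairwise (· < ·) :=
  (PySem.List.pairwise_lt_pyRange_one blo bhi).filter _

lemma pvCandRow_mem (a b : List String) (blo bhi i z : Int) :
    z ∈ pvCandRow a b blo bhi i ↔
      blo ≤ z ∧ z < bhi ∧ PySem.List.pyGetD a i "" = PySem.List.pyGetD b z "" := by
  unfold pvCandRow
  rw [List.mem_filter, PySem.List.mem_pyRange_one]
  constructor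
  · rintro ⟨⟨h1, h2⟩, h3⟩
    exact ⟨h1, h2, beq_iff_eq.mp h3⟩
  · rintro ⟨h1, h2, h3⟩
    exact ⟨⟨h1, h2⟩, beq_iff_eq.mpr h3⟩

lemma pvFiltered_eq_cand (a b : List String) (alo ahi blo bhi : Int)
    (hv : 0 ≤ alo ∧ ahi ≤ (a.length : Int) ∧ 0 ≤ blo ∧ bhi ≤ (b.length : Int)) (i : Int) :
    (pvJs a b i).filter (fun j => decide (blo ≤ j) && decide (j < bhi)) =
      pvCandRow a b blo bhi i := by
  have hp1 : ((pvJs a b i).filter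
      (fun j => decide (blo ≤ j) && decide (j < bhi))).Pairwise (· < ·) :=
    (pvJs_pairwise a b i).filter _
  have hp2 := pvCandRow_pairwise a b blo bhi i
  have hmem : ∀ z, z ∈ (pvJs a b i).filter (fun j => decide (blo ≤ j) && decide (j < bhi)) ↔
      z ∈ pvCandRow a b blo bhi i := by
    intro z
    rw [List.mem_filter, pvJs_mem, pvCandRow_mem]
    constructor
    · rintro ⟨⟨h0, hlen, hch⟩, hb⟩
      simp only [Bool.and_eq_true, decide_eq_true_eq] at hb
      exact ⟨hb.1, hb.2, hch.symm⟩
    · rintro ⟨h1, h2, h3⟩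
      refine ⟨⟨by omega, by omega, h3.symm⟩, ?_⟩
      simp only [Bool.and_eq_true, decide_eq_true_eq]
      exact ⟨h1, h2⟩
  have hperm : ((pvJs a b i).filter
      (fun j => decide (blo ≤ j) && decide (j < bhi))).Perm (pvCandRow a b blo bhi i) := by
    rw [List.perm_ext_iff_of_nodup (hp1.imp ne_of_lt) (hp2.imp ne_of_lt)]
    exact hmem
  exact List.Perm.eq_of_pairwise (le := (· < ·))
    (fun x y _ _ h1 h2 => absurd h2 (by omega)) hp1 hp2 hperm

-- the inner DP loop, rewritten as a fold over the window-filtered candidate list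
lemma pvFlmInner_spec (j2len : PySem.Dict Int Int) (i blo bhi : Int) :
    ∀ (js : List Int) (nd : PySem.Dict Int Int) (best : Int × Int × Int),
      js.Pairwise (· < ·) →
      pvFlmInner j2len i blo bhi js nd best =
        (js.filter (fun j => decide (blo ≤ j) && decide (j < bhi))).foldl
          (fun st j =>
            (st.1.insert j (j2len.getD (j - 1) 0 + 1),
             if st.2.2.2 < j2len.getD (j - 1) 0 + 1 then
               (i - (j2len.getD (j - 1) 0 + 1) + 1, j - (j2len.getD (j - 1) 0 + 1) + 1,
                j2len.getD (j - 1) 0 + 1)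
             else st.2)) (nd, best) := by
  intro js
  induction js with
  | nil => intro nd best _; rfl
  | cons j js ih =>
    intro nd best hp
    rw [List.pairwise_cons] at hp
    simp only [pvFlmInner]
    by_cases h1 : j < blo
    · rw [if_pos h1,
        show List.filter (fun j => decide (blo ≤ j) && decide (j < bhi)) (j :: js) =
          List.filter (fun j => decide (blo ≤ j) && decide (j < bhi)) js from by
            rw [List.filter_cons, if_neg (by simp; omega)]]
      exact ih nd best hp.2
    · rw [if_neg h1]
      by_cases h2 : bhi ≤ j
      · rw [if_pos h2]
        rw [show List.filter (fun j => decide (blo ≤ j) && decide (j < bhi)) (j :: js) =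
            ([] : List Int) from by
          rw [List.filter_cons, if_neg (by simp; omega),
            List.filter_eq_nil_iff.mpr (fun x hx => by have := hp.1 x hx; simp; omega)]]
        rfl
      · rw [if_neg h2]
        rw [show List.filter (fun j => decide (blo ≤ j) && decide (j < bhi)) (j :: js) =
            j :: List.filter (fun j => decide (blo ≤ j) && decide (j < bhi)) js from by
          rw [List.filter_cons, if_pos (by simp; omega)]]
        rw [List.foldl_cons]
        exact ih _ _ hp.2

-- a fold whose step acts componentwise splits into two folds
lemma pvPairFold (F : PySem.Dict Int Int → Int → PySem.Dict Int Int)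
    (G : (Int × Int × Int) → Int → Int × Int × Int) :
    ∀ (js : List Int) (nd : PySem.Dict Int Int) (best : Int × Int × Int),
      js.foldl (fun st j => (F st.1 j, G st.2 j)) (nd, best) =
        (js.foldl F nd, js.foldl G best) := by
  intro js
  induction js with
  | nil => intro nd best; rfl
  | cons j js ih => intro nd best; simp only [List.foldl_cons]; exact ih _ _

lemma pvInsertFold_getD (k : Int → Int) :
    ∀ (js : List Int) (nd : PySem.Dict Int Int) (j' : Int),
      (js.foldl (fun nd j => nd.insert j (k j)) nd).getD j' 0 =
        if j' ∈ js then k j' else nd.getD j' 0 := by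
  intro js
  induction js with
  | nil => intro nd j'; simp
  | cons j js ih =>
    intro nd j'
    simp only [List.foldl_cons]
    rw [ih]
    by_cases hmem : j' ∈ js
    · rw [if_pos hmem, if_pos (by simp [hmem])]
    · rw [if_neg hmem]
      rw [PySem.Dict.getD_insert]
      by_cases hje : j' = j
      · rw [if_pos hje, if_pos (by simp [hje])]
        exact congrArg k hje.symm
      · rw [if_neg hje, if_neg (by simp [hje, hmem])]

-- per candidate, the DP dict lookup computes the backward run length
lemma pvK_eq_bwd (a b : List String) (alo blo bhi : Int) (i : Int) (hi1 : alo ≤ i)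
    (d : PySem.Dict Int Int) (hd : pvInvRow a b alo blo bhi (i - 1) d)
    (j : Int) (hjb : blo ≤ j) (hjh : j < bhi)
    (hch : PySem.List.pyGetD a i "" = PySem.List.pyGetD b j "") :
    d.getD (j - 1) 0 + 1 = pvBwd a b alo blo i j := by
  rw [show pvBwd a b alo blo i j = pvBwd a b alo blo (i - 1) (j - 1) + 1 by
    rw [pvBwd, if_pos ⟨hi1, hjb, hch⟩]]
  by_cases hb : blo ≤ j - 1
  · rw [hd.1 (j - 1) hb (by omega)]
  · rw [hd.2 (j - 1) (by omega)]
    rw [show pvBwd a b alo blo (i - 1) (j - 1) = 0 by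
      rw [pvBwd, if_neg (by rintro ⟨-, h, -⟩; omega)]]

-- the DP row: dict invariant advances one row, best advances by the canonical row fold
lemma pvRowDP (a b : List String) (alo ahi blo bhi : Int)
    (hv : 0 ≤ alo ∧ ahi ≤ (a.length : Int) ∧ 0 ≤ blo ∧ bhi ≤ (b.length : Int))
    (i : Int) (hi1 : alo ≤ i) (hi2 : i < ahi)
    (d : PySem.Dict Int Int) (hd : pvInvRow a b alo blo bhi (i - 1) d)
    (best : Int × Int × Int) :
    pvInvRow a b alo blo bhi i
      (pvFlmInner d i blo bhi (pvJs a b i) PySem.Dict.empty best).1 ∧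
    (pvFlmInner d i blo bhi (pvJs a b i) PySem.Dict.empty best).2 =
      (pvCandRow a b blo bhi i).foldl (pvStepC a b alo blo i) best := by
  rw [pvFlmInner_spec d i blo bhi (pvJs a b i) PySem.Dict.empty best (pvJs_pairwise a b i)]
  rw [pvFiltered_eq_cand a b alo ahi blo bhi hv i]
  rw [pvPairFold (fun nd j => nd.insert j (d.getD (j - 1) 0 + 1))
    (fun best j => if best.2.2 < d.getD (j - 1) 0 + 1 then
      (i - (d.getD (j - 1) 0 + 1) + 1, j - (d.getD (j - 1) 0 + 1) + 1, d.getD (j - 1) 0 + 1)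
    else best)]
  constructor
  · -- dict invariant for row i
    constructor
    · intro j' hj'b hj'h
      rw [pvInsertFold_getD]
      by_cases hmem : j' ∈ pvCandRow a b blo bhi i
      · rw [if_pos hmem]
        obtain ⟨_, _, hch⟩ := (pvCandRow_mem a b blo bhi i j').mp hmem
        exact pvK_eq_bwd a b alo blo bhi i hi1 d hd j' hj'b hj'h hch
      · rw [if_neg hmem]
        have hch : ¬ PySem.List.pyGetD a i "" = PySem.List.pyGetD b j' "" := by
          intro hch
          exact hmem ((pvCandRow_mem a b blo bhi i j').mpr ⟨hj'b, hj'h, hch⟩)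
        rw [show pvBwd a b alo blo i j' = 0 by
          rw [pvBwd, if_neg (by intro h; exact hch h.2.2)]]
        simp
    · intro j' hj'
      rw [pvInsertFold_getD]
      rw [if_neg (fun hmem => by
        have := (pvCandRow_mem a b blo bhi i j').mp hmem
        omega)]
      simp
  · -- best component is the canonical row fold
    apply PySem.List.foldl_congr_mem
    intro best' j hj
    obtain ⟨hjb, hjh, hch⟩ := (pvCandRow_mem a b blo bhi i j).mp hj
    rw [pvK_eq_bwd a b alo blo bhi i hi1 d hd j hjb hjh hch]
    rfl

lemma pvFlmOuter_spec (a b : List String) (alo ahi blo bhi : Int)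
    (hv : 0 ≤ alo ∧ ahi ≤ (a.length : Int) ∧ 0 ≤ blo ∧ bhi ≤ (b.length : Int)) :
    ∀ (i0 : Int) (d : PySem.Dict Int Int) (best : Int × Int × Int), alo ≤ i0 →
      pvInvRow a b alo blo bhi (i0 - 1) d →
      pvFlmOuter a (pvB2J b) blo bhi (PySem.List.pyRange i0 ahi 1) d best =
        (PySem.List.pyRange i0 ahi 1).foldl (fun best i =>
          (pvCandRow a b blo bhi i).foldl (pvStepC a b alo blo i) best) best := by
  intro i0 d best hi0 hd
  by_cases hend : i0 < ahi
  · rw [PySem.List.pyRange_one_cons hend]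
    simp only [pvFlmOuter, List.foldl_cons]
    have hrow := pvRowDP a b alo ahi blo bhi hv i0 hi0 hend d hd best
    rw [show (pvB2J b).getD (PySem.List.pyGetD a i0 "") [] = pvJs a b i0 from rfl]
    rw [hrow.2]
    exact pvFlmOuter_spec a b alo ahi blo bhi hv (i0 + 1) _ _ (by omega)
      (by rw [show i0 + 1 - 1 = i0 by ring]; exact hrow.1)
  · have hr : PySem.List.pyRange i0 ahi 1 = [] := by
      rw [PySem.List.pyRange_one, show (ahi - i0).toNat = 0 by omega]
      rfl
    rw [hr]
    rfl
termination_by i0 => (ahi - i0).toNat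
decreasing_by omega

theorem pvFlm_eq_scan (a b : List String) (alo ahi blo bhi : Int)
    (hv : 0 ≤ alo ∧ ahi ≤ (a.length : Int) ∧ 0 ≤ blo ∧ bhi ≤ (b.length : Int)) :
    pvFlmOuter a (pvB2J b) blo bhi (PySem.List.pyRange alo ahi 1) PySem.Dict.empty
        (alo, blo, 0) = pvScan a b alo ahi blo bhi := by
  rw [pvFlmOuter_spec a b alo ahi blo bhi hv alo PySem.Dict.empty (alo, blo, 0)
    (le_refl _) ?_]
  · rfl
  · constructor
    · intro j' _ _
      rw [show pvBwd a b alo blo (alo - 1) j' = 0 by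
        rw [pvBwd, if_neg (by rintro ⟨h, -, -⟩; omega)]]
      simp
    · intro j' _
      simp

-- ---------- the scan's invariants and the no-op extension loops ----------

def pvScanInv (a b : List String) (alo ahi blo bhi : Int) (best : Int × Int × Int) : Prop :=
  (best = (alo, blo, 0)) ∨
    (alo ≤ best.1 ∧ blo ≤ best.2.1 ∧ best.1 + best.2.2 ≤ ahi ∧
      best.2.1 + best.2.2 ≤ bhi ∧ 1 ≤ best.2.2 ∧
      pvBwd a b alo blo (best.1 + best.2.2 - 1) (best.2.1 + best.2.2 - 1) = best.2.2)

lemma pvRow_inv (a b : List String) (alo ahi blo bhi i : Int)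
    (hi1 : alo ≤ i) (hi2 : i < ahi) :
    ∀ (js : List Int) (best : Int × Int × Int), (∀ j ∈ js, blo ≤ j ∧ j < bhi) →
      pvScanInv a b alo ahi blo bhi best →
      pvScanInv a b alo ahi blo bhi (js.foldl (pvStepC a b alo blo i) best) ∧
      best.2.2 ≤ (js.foldl (pvStepC a b alo blo i) best).2.2 ∧
      (∀ j ∈ js, pvBwd a b alo blo i j ≤ (js.foldl (pvStepC a b alo blo i) best).2.2) := by
  intro js
  induction js with
  | nil => intro best _ hb; exact ⟨hb, le_refl _, by simp⟩
  | cons j js ih =>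
    intro best hmem hb
    obtain ⟨hjb, hjh⟩ := hmem j (by simp)
    have hbk0 : 0 ≤ best.2.2 := by
      rcases hb with hb | hb
      · rw [hb]
      · omega
    have hstep : pvScanInv a b alo ahi blo bhi (pvStepC a b alo blo i best j) ∧
        best.2.2 ≤ (pvStepC a b alo blo i best j).2.2 ∧
        pvBwd a b alo blo i j ≤ (pvStepC a b alo blo i best j).2.2 := by
      simp only [pvStepC]
      split_ifs with hlt
      · have hle := pvBwd_le a b alo blo i j (by omega) (by omega)
        refine ⟨?_, show best.2.2 ≤ pvBwd a b alo blo i j by omega,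
          show pvBwd a b alo blo i j ≤ pvBwd a b alo blo i j from le_refl _⟩
        simp only [pvScanInv]
        right
        refine ⟨by omega, by omega, by omega, by omega, by omega, ?_⟩
        rw [show i - pvBwd a b alo blo i j + 1 + pvBwd a b alo blo i j - 1 = i by ring,
            show j - pvBwd a b alo blo i j + 1 + pvBwd a b alo blo i j - 1 = j by ring]
      · exact ⟨hb, le_refl _, by omega⟩
    have hres := ih (pvStepC a b alo blo i best j)
      (fun x hx => hmem x (by simp [hx])) hstep.1
    simp only [List.foldl_cons]
    refine ⟨hres.1, ?_, ?_⟩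
    · have h1 := hstep.2.1
      have h2 := hres.2.1
      omega
    · intro x hx
      rcases List.mem_cons.mp hx with hx | hx
      · subst hx
        have h1 := hstep.2.2
        have h2 := hres.2.1
        omega
      · exact hres.2.2 x hx

lemma pvScanAux (a b : List String) (alo ahi blo bhi : Int) :
    ∀ (is : List Int) (best : Int × Int × Int), (∀ i ∈ is, alo ≤ i ∧ i < ahi) →
      pvScanInv a b alo ahi blo bhi best →
      pvScanInv a b alo ahi blo bhi
        (is.foldl (fun best i =>
          (pvCandRow a b blo bhi i).foldl (pvStepC a b alo blo i) best) best) ∧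
      best.2.2 ≤ (is.foldl (fun best i =>
          (pvCandRow a b blo bhi i).foldl (pvStepC a b alo blo i) best) best).2.2 ∧
      (∀ i ∈ is, ∀ j, blo ≤ j → j < bhi →
        PySem.List.pyGetD a i "" = PySem.List.pyGetD b j "" →
        pvBwd a b alo blo i j ≤ (is.foldl (fun best i =>
          (pvCandRow a b blo bhi i).foldl (pvStepC a b alo blo i) best) best).2.2) := by
  intro is
  induction is with
  | nil => intro best _ hb; exact ⟨hb, le_refl _, by simp⟩
  | cons i is ih =>
    intro best hmem hb
    obtain ⟨hi1, hi2⟩ := hmem i (by simp)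
    have hrow := pvRow_inv a b alo ahi blo bhi i hi1 hi2 (pvCandRow a b blo bhi i) best
      (fun j hj => by
        obtain ⟨hj1, _⟩ := List.mem_filter.mp hj
        exact (PySem.List.mem_pyRange_one.mp hj1))
      hb
    have hres := ih _ (fun x hx => hmem x (by simp [hx])) hrow.1
    simp only [List.foldl_cons]
    refine ⟨hres.1, ?_, ?_⟩
    · have h1 := hrow.2.1
      have h2 := hres.2.1
      omega
    · intro x hx j hjb hjh hchars
      rcases List.mem_cons.mp hx with hx | hx
      · subst hx
        have hjmem : j ∈ pvCandRow a b blo bhi x :=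
          List.mem_filter.mpr ⟨PySem.List.mem_pyRange_one.mpr ⟨hjb, hjh⟩, by simpa using hchars⟩
        have h1 := hrow.2.2 j hjmem
        have h2 := hres.2.1
        omega
      · exact hres.2.2 x hx j hjb hjh hchars

theorem pvScan_inv (a b : List String) (alo ahi blo bhi : Int) :
    pvScanInv a b alo ahi blo bhi (pvScan a b alo ahi blo bhi) ∧
      (∀ i, alo ≤ i → i < ahi → ∀ j, blo ≤ j → j < bhi →
        PySem.List.pyGetD a i "" = PySem.List.pyGetD b j "" →
          pvBwd a b alo blo i j ≤ (pvScan a b alo ahi blo bhi).2.2) := by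
  have h := pvScanAux a b alo ahi blo bhi (PySem.List.pyRange alo ahi 1) (alo, blo, 0)
    (fun i hi => PySem.List.mem_pyRange_one.mp hi) (Or.inl rfl)
  exact ⟨h.1, fun i h1 h2 => h.2.2 i (PySem.List.mem_pyRange_one.mpr ⟨h1, h2⟩)⟩

theorem pvFindLongestMatch_eq_brute (a b : List String) (alo ahi blo bhi : Int)
    (hv : 0 ≤ alo ∧ ahi ≤ (a.length : Int) ∧ 0 ≤ blo ∧ bhi ≤ (b.length : Int)) :
    pvFindLongestMatch a b (pvB2J b) alo ahi blo bhi = pvBruteMatch a b alo ahi blo bhi := by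
  obtain ⟨hInv, hGmax⟩ := pvScan_inv a b alo ahi blo bhi
  simp only [pvFindLongestMatch]
  rw [pvFlm_eq_scan a b alo ahi blo bhi hv]
  set s := pvScan a b alo ahi blo bhi with hs
  have hL : pvExtLeft a b alo blo s.1 s.2.1 s.2.2 = (s.1, s.2.1, s.2.2) := by
    rw [pvExtLeft, dif_neg]
    rcases hInv with hz | hg
    · rintro ⟨c1, -, -⟩
      rw [hz] at c1
      exact lt_irrefl _ c1
    · rintro ⟨c1, c2, c3⟩
      have hstop := pvBwd_stop a b alo blo (s.1 + s.2.2 - 1) (s.2.1 + s.2.2 - 1)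
      rw [hg.2.2.2.2.2] at hstop
      rw [show s.1 + s.2.2 - 1 - s.2.2 = s.1 - 1 by ring,
          show s.2.1 + s.2.2 - 1 - s.2.2 = s.2.1 - 1 by ring] at hstop
      exact hstop ⟨by omega, by omega, c3⟩
  have hR : pvExtRight a b ahi bhi s.1 s.2.1 s.2.2 = s.2.2 := by
    rw [pvExtRight, dif_neg]
    rintro ⟨c1, c2, c3⟩
    rcases hInv with hz | hg
    · have h1 : s.1 = alo := by rw [hz]
      have h2 : s.2.1 = blo := by rw [hz]
      have h3 : s.2.2 = (0 : Int) := by rw [hz]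
      simp only [h3, add_zero] at c1 c2 c3
      rw [h1] at c1 c3
      rw [h2] at c2 c3
      have hb1 : pvBwd a b alo blo alo blo =
          pvBwd a b alo blo (alo - 1) (blo - 1) + 1 := by
        rw [pvBwd, if_pos ⟨le_refl _, le_refl _, c3⟩]
      have hnn := pvBwd_nonneg a b alo blo (alo - 1) (blo - 1)
      have hmax := hGmax alo (le_refl _) c1 blo (le_refl _) c2 c3
      rw [h3] at hmax
      omega
    · have hc : pvBwd a b alo blo (s.1 + s.2.2) (s.2.1 + s.2.2) =
          pvBwd a b alo blo (s.1 + s.2.2 - 1) (s.2.1 + s.2.2 - 1) + 1 := by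
        rw [pvBwd, if_pos ⟨by omega, by omega, c3⟩]
      have hmax := hGmax (s.1 + s.2.2) (by omega) c1 (s.2.1 + s.2.2) (by omega) c2 c3
      rw [hg.2.2.2.2.2] at hc
      omega
  rw [hL]
  rw [show ((s.1, s.2.1, s.2.2) : Int × Int × Int).1 = s.1 from rfl,
    show ((s.1, s.2.1, s.2.2) : Int × Int × Int).2.1 = s.2.1 from rfl,
    show ((s.1, s.2.1, s.2.2) : Int × Int × Int).2.2 = s.2.2 from rfl]
  rw [hR, pvBruteMatch_eq_scan a b alo ahi blo bhi, ← hs]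

-- ---------- the recursion tree of matching blocks ----------

def pvRecBlocks (a b : List String) (alo ahi blo bhi : Int) : List (Int × Int × Int) :=
  let m := pvBruteMatch a b alo ahi blo bhi
  if m.2.2 = 0 then []
  else
    pvRecBlocks a b alo m.1 blo m.2.1 ++
      m :: pvRecBlocks a b (m.1 + m.2.2) ahi (m.2.1 + m.2.2) bhi
termination_by ((ahi - alo) + (bhi - blo)).toNat
decreasing_by
  all_goals
    rename_i hm0
    rcases pvBruteMatch_ok a b alo ahi blo bhi with h | h
    · exact absurd (by show (pvBruteMatch a b alo ahi blo bhi).2.2 = 0; rw [h]) hm0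
    · omega

def pvNC (a b : List String) (alo ahi blo bhi : Int) : Nat :=
  let m := pvBruteMatch a b alo ahi blo bhi
  if m.2.2 = 0 then 1
  else 1 + pvNC a b alo m.1 blo m.2.1 + pvNC a b (m.1 + m.2.2) ahi (m.2.1 + m.2.2) bhi
termination_by ((ahi - alo) + (bhi - blo)).toNat
decreasing_by
  all_goals
    rename_i hm0
    rcases pvBruteMatch_ok a b alo ahi blo bhi with h | h
    · exact absurd (by show (pvBruteMatch a b alo ahi blo bhi).2.2 = 0; rw [h]) hm0
    · omega

theorem pvNC_le (a b : List String) (alo ahi blo bhi : Int) :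
    pvNC a b alo ahi blo bhi ≤ 2 * (ahi - alo).toNat + 1 := by
  rw [pvNC]
  rcases pvBruteMatch_ok a b alo ahi blo bhi with h | h
  · simp only [h]
    norm_num
  · have h0 : ¬ (pvBruteMatch a b alo ahi blo bhi).2.2 = 0 := by omega
    simp only [h0, if_false]
    have h1 := pvNC_le a b alo (pvBruteMatch a b alo ahi blo bhi).1 blo
      (pvBruteMatch a b alo ahi blo bhi).2.1
    have h2 := pvNC_le a b
      ((pvBruteMatch a b alo ahi blo bhi).1 + (pvBruteMatch a b alo ahi blo bhi).2.2) ahi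
      ((pvBruteMatch a b alo ahi blo bhi).2.1 + (pvBruteMatch a b alo ahi blo bhi).2.2) bhi
    omega
termination_by ((ahi - alo) + (bhi - blo)).toNat
decreasing_by
  all_goals rcases pvBruteMatch_ok a b alo ahi blo bhi with h | h
  · rw [h] at h0; simp at h0
  · omega
  · rw [h] at h0; simp at h0
  · omega

theorem pvBruteMatch_empty (a b : List String) (alo ahi blo bhi : Int)
    (h : ahi ≤ alo ∨ bhi ≤ blo) : pvBruteMatch a b alo ahi blo bhi = (alo, blo, 0) := by
  rcases h with h | h
  · have hr : PySem.List.pyRange alo ahi 1 = [] := by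
      rw [PySem.List.pyRange_one, show (ahi - alo).toNat = 0 by omega]
      rfl
    rw [pvBruteMatch, hr]
    rfl
  · have hr : PySem.List.pyRange blo bhi 1 = [] := by
      rw [PySem.List.pyRange_one, show (bhi - blo).toNat = 0 by omega]
      rfl
    have houter : ∀ (is : List Int) (best : Int × Int × Int),
        pvBruteOuter a b alo blo bhi is best = best := by
      intro is
      induction is with
      | nil => intro best; rfl
      | cons i is ih => intro best; simp only [pvBruteOuter, hr, pvBruteInner]; exact ih best
    rw [pvBruteMatch, houter]

theorem pvRecBlocks_bounds (a b : List String) (alo ahi blo bhi : Int) :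
    ∀ t ∈ pvRecBlocks a b alo ahi blo bhi,
      alo ≤ t.1 ∧ t.1 + t.2.2 ≤ ahi ∧ blo ≤ t.2.1 ∧ t.2.1 + t.2.2 ≤ bhi ∧ 1 ≤ t.2.2 := by
  intro t ht
  rw [pvRecBlocks] at ht
  rcases pvBruteMatch_ok a b alo ahi blo bhi with h | h
  · simp only [h] at ht
    simp at ht
  · have h0 : ¬ (pvBruteMatch a b alo ahi blo bhi).2.2 = 0 := by omega
    simp only [h0, if_false, List.mem_append, List.mem_cons] at ht
    rcases ht with ht | ht | ht
    · have := pvRecBlocks_bounds a b alo (pvBruteMatch a b alo ahi blo bhi).1 blo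
        (pvBruteMatch a b alo ahi blo bhi).2.1 t ht
      omega
    · rw [ht]; omega
    · have := pvRecBlocks_bounds a b
        ((pvBruteMatch a b alo ahi blo bhi).1 + (pvBruteMatch a b alo ahi blo bhi).2.2) ahi
        ((pvBruteMatch a b alo ahi blo bhi).2.1 + (pvBruteMatch a b alo ahi blo bhi).2.2) bhi t ht
      omega
termination_by ((ahi - alo) + (bhi - blo)).toNat
decreasing_by
  all_goals rcases pvBruteMatch_ok a b alo ahi blo bhi with h | h
  · rw [h] at h0; simp at h0
  · omega
  · rw [h] at h0; simp at h0
  · omega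

theorem pvRecBlocks_pairwise (a b : List String) (alo ahi blo bhi : Int) :
    (pvRecBlocks a b alo ahi blo bhi).Pairwise (fun x y => x.1 < y.1) := by
  rw [pvRecBlocks]
  rcases pvBruteMatch_ok a b alo ahi blo bhi with h | h
  · simp [h]
  · have h0 : ¬ (pvBruteMatch a b alo ahi blo bhi).2.2 = 0 := by omega
    simp only [h0, if_false]
    rw [List.pairwise_append]
    refine ⟨pvRecBlocks_pairwise a b alo (pvBruteMatch a b alo ahi blo bhi).1 blo
        (pvBruteMatch a b alo ahi blo bhi).2.1, ?_, ?_⟩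
    · rw [List.pairwise_cons]
      refine ⟨?_, pvRecBlocks_pairwise a b _ ahi _ bhi⟩
      intro t ht
      have := pvRecBlocks_bounds a b
        ((pvBruteMatch a b alo ahi blo bhi).1 + (pvBruteMatch a b alo ahi blo bhi).2.2) ahi
        ((pvBruteMatch a b alo ahi blo bhi).2.1 + (pvBruteMatch a b alo ahi blo bhi).2.2) bhi t ht
      omega
    · intro x hx y hy
      have hxb := pvRecBlocks_bounds a b alo (pvBruteMatch a b alo ahi blo bhi).1 blo
        (pvBruteMatch a b alo ahi blo bhi).2.1 x hx
      rcases List.mem_cons.mp hy with hy | hy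
      · rw [hy]; omega
      · have := pvRecBlocks_bounds a b
          ((pvBruteMatch a b alo ahi blo bhi).1 + (pvBruteMatch a b alo ahi blo bhi).2.2) ahi
          ((pvBruteMatch a b alo ahi blo bhi).2.1 + (pvBruteMatch a b alo ahi blo bhi).2.2) bhi y hy
        omega
termination_by ((ahi - alo) + (bhi - blo)).toNat
decreasing_by
  all_goals rcases pvBruteMatch_ok a b alo ahi blo bhi with h | h
  · rw [h] at h0; simp at h0
  · omega
  · rw [h] at h0; simp at h0
  · omega

lemma pvNC_pos (a b : List String) (alo ahi blo bhi : Int) :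
    1 ≤ pvNC a b alo ahi blo bhi := by
  rw [pvNC]
  split <;> omega

lemma pvRecBlocks_empty (a b : List String) (alo ahi blo bhi : Int)
    (h : ahi ≤ alo ∨ bhi ≤ blo) : pvRecBlocks a b alo ahi blo bhi = [] := by
  rw [pvRecBlocks]
  simp [pvBruteMatch_empty a b alo ahi blo bhi h]

theorem pvGmbLoop_perm (a b : List String) :
    ∀ (fuel : Nat) (Q : List (Int × Int × Int × Int)) (acc : List (Int × Int × Int)),
      (∀ R ∈ Q, 0 ≤ R.1 ∧ R.2.1 ≤ (a.length : Int) ∧ 0 ≤ R.2.2.1 ∧ R.2.2.2 ≤ (b.length : Int)) →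
      (Q.map (fun R => pvNC a b R.1 R.2.1 R.2.2.1 R.2.2.2)).sum ≤ fuel →
      (pvGmbLoop a b (pvB2J b) fuel Q acc).Perm
        (acc ++ Q.flatMap (fun R => pvRecBlocks a b R.1 R.2.1 R.2.2.1 R.2.2.2)) := by
  intro fuel
  induction fuel with
  | zero =>
    intro Q acc hval hfuel
    cases Q with
    | nil => simp [pvGmbLoop]
    | cons R rest =>
      exfalso
      obtain ⟨alo, ahi, blo, bhi⟩ := R
      have h1 := pvNC_pos a b alo ahi blo bhi
      simp only [List.map_cons, List.sum_cons] at hfuel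
      omega
  | succ fuel ih =>
    intro Q acc hval hfuel
    cases Q with
    | nil => simp [pvGmbLoop]
    | cons R rest =>
      obtain ⟨alo, ahi, blo, bhi⟩ := R
      have hvR := hval (alo, ahi, blo, bhi) (by simp)
      have hva : (0 : Int) ≤ alo := hvR.1
      have hvahi : ahi ≤ (a.length : Int) := hvR.2.1
      have hvb : (0 : Int) ≤ blo := hvR.2.2.1
      have hvbhi : bhi ≤ (b.length : Int) := hvR.2.2.2
      have hvrest : ∀ R ∈ rest, 0 ≤ R.1 ∧ R.2.1 ≤ (a.length : Int) ∧ 0 ≤ R.2.2.1 ∧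
          R.2.2.2 ≤ (b.length : Int) := fun x hx => hval x (by simp [hx])
      simp only [List.map_cons, List.sum_cons] at hfuel
      simp only [pvGmbLoop]
      rw [pvFindLongestMatch_eq_brute a b alo ahi blo bhi ⟨hva, hvahi, hvb, hvbhi⟩]
      simp only [List.flatMap_cons]
      rcases pvBruteMatch_ok a b alo ahi blo bhi with hok0 | hok
      · -- zero-size match: the whole region contributes no block
        have hk : (pvBruteMatch a b alo ahi blo bhi).2.2 = 0 := by rw [hok0]
        rw [if_neg (by omega)]
        have hrb : pvRecBlocks a b alo ahi blo bhi = [] := by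
          rw [pvRecBlocks]
          simp [hok0]
        rw [hrb, List.nil_append]
        exact ih rest acc hvrest (by have := pvNC_pos a b alo ahi blo bhi; omega)
      · have hk : ¬ (pvBruteMatch a b alo ahi blo bhi).2.2 = 0 := by omega
        rw [if_pos hk]
        have hnc : pvNC a b alo ahi blo bhi =
            1 + pvNC a b alo (pvBruteMatch a b alo ahi blo bhi).1 blo (pvBruteMatch a b alo ahi blo bhi).2.1 +
              pvNC a b ((pvBruteMatch a b alo ahi blo bhi).1 + (pvBruteMatch a b alo ahi blo bhi).2.2) ahi
                ((pvBruteMatch a b alo ahi blo bhi).2.1 + (pvBruteMatch a b alo ahi blo bhi).2.2) bhi := by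
          rw [pvNC]
          simp only [if_neg hk]
        have hdec : pvRecBlocks a b alo ahi blo bhi =
            pvRecBlocks a b alo (pvBruteMatch a b alo ahi blo bhi).1 blo (pvBruteMatch a b alo ahi blo bhi).2.1 ++
              (pvBruteMatch a b alo ahi blo bhi) ::
                pvRecBlocks a b ((pvBruteMatch a b alo ahi blo bhi).1 + (pvBruteMatch a b alo ahi blo bhi).2.2) ahi
                  ((pvBruteMatch a b alo ahi blo bhi).2.1 + (pvBruteMatch a b alo ahi blo bhi).2.2) bhi := by
          conv_lhs => rw [pvRecBlocks]
          simp only [if_neg hk]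
        have hvl : (0 : Int) ≤ alo ∧ (pvBruteMatch a b alo ahi blo bhi).1 ≤ (a.length : Int) ∧ (0 : Int) ≤ blo ∧
            (pvBruteMatch a b alo ahi blo bhi).2.1 ≤ (b.length : Int) := ⟨hva, by omega, hvb, by omega⟩
        have hvr : (0 : Int) ≤ (pvBruteMatch a b alo ahi blo bhi).1 + (pvBruteMatch a b alo ahi blo bhi).2.2 ∧ ahi ≤ (a.length : Int) ∧
            (0 : Int) ≤ (pvBruteMatch a b alo ahi blo bhi).2.1 + (pvBruteMatch a b alo ahi blo bhi).2.2 ∧ bhi ≤ (b.length : Int) :=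
          ⟨by omega, hvahi, by omega, hvbhi⟩
        rw [hdec]
        set recL := pvRecBlocks a b alo (pvBruteMatch a b alo ahi blo bhi).1 blo (pvBruteMatch a b alo ahi blo bhi).2.1 with hrecL
        set recR := pvRecBlocks a b ((pvBruteMatch a b alo ahi blo bhi).1 + (pvBruteMatch a b alo ahi blo bhi).2.2) ahi
          ((pvBruteMatch a b alo ahi blo bhi).2.1 + (pvBruteMatch a b alo ahi blo bhi).2.2) bhi with hrecR
        set flat := rest.flatMap (fun R => pvRecBlocks a b R.1 R.2.1 R.2.2.1 R.2.2.2) with hflat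
        split_ifs with hpr hpl hpl
        · -- both subregions pushed: queue is right :: left :: rest
          refine (ih _ (acc ++ [pvBruteMatch a b alo ahi blo bhi])
            (by
              intro x hx
              rcases List.mem_cons.mp hx with hx | hx
              · subst hx; exact hvr
              rcases List.mem_cons.mp hx with hx | hx
              · subst hx; exact hvl
              · exact hvrest x hx)
            (by simp only [List.map_cons, List.sum_cons]; omega)).trans ?_
          simp only [List.flatMap_cons, ← hrecL, ← hrecR, ← hflat, List.append_assoc]
          refine List.Perm.append_left acc ?_
          simp only [List.singleton_append, List.cons_append, List.nil_append]
          refine (List.Perm.cons (pvBruteMatch a b alo ahi blo bhi) ?_).trans List.perm_middle.symm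
          rw [← List.append_assoc, ← List.append_assoc]
          exact (List.perm_append_comm).append_right flat
        · -- only the right subregion pushed: left region is empty
          have hrl : recL = [] := by
            rw [hrecL]
            refine pvRecBlocks_empty a b _ _ _ _ ?_
            rcases pvBruteMatch_ok a b alo ahi blo bhi with h | h
            · rw [h] at hk; simp at hk
            · omega
          refine (ih _ (acc ++ [pvBruteMatch a b alo ahi blo bhi])
            (by
              intro x hx
              rcases List.mem_cons.mp hx with hx | hx
              · subst hx; exact hvr
              · exact hvrest x hx)
            (by simp only [List.map_cons, List.sum_cons]; omega)).trans ?_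
          simp only [List.flatMap_cons, ← hrecR, ← hflat, hrl, List.nil_append,
            List.append_assoc, List.singleton_append, List.cons_append]
          exact List.Perm.refl _
        · -- only the left subregion pushed: right region is empty
          have hrr : recR = [] := by
            rw [hrecR]
            refine pvRecBlocks_empty a b _ _ _ _ ?_
            omega
          refine (ih _ (acc ++ [pvBruteMatch a b alo ahi blo bhi])
            (by
              intro x hx
              rcases List.mem_cons.mp hx with hx | hx
              · subst hx; exact hvl
              · exact hvrest x hx)
            (by simp only [List.map_cons, List.sum_cons]; omega)).trans ?_
          simp only [List.flatMap_cons, ← hrecL, ← hflat, hrr, List.append_assoc,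
            List.singleton_append, List.cons_append, List.nil_append]
          refine List.Perm.append_left acc ?_
          exact List.perm_middle.symm
        · -- neither pushed: both subregions empty
          have hrl : recL = [] := by
            rw [hrecL]
            refine pvRecBlocks_empty a b _ _ _ _ ?_
            rcases pvBruteMatch_ok a b alo ahi blo bhi with h | h
            · rw [h] at hk; simp at hk
            · omega
          have hrr : recR = [] := by
            rw [hrecR]
            refine pvRecBlocks_empty a b _ _ _ _ ?_
            omega
          refine (ih _ (acc ++ [pvBruteMatch a b alo ahi blo bhi]) hvrest
            (by omega)).trans ?_
          simp only [← hflat, hrl, hrr, List.nil_append, List.append_assoc,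
            List.singleton_append, List.cons_append]
          exact List.Perm.refl _

-- ---------- the stable two-key sort pins down the strictly increasing arrangement ----------

def pvBefore (p q : Int × Int × Int) : Bool :=
  decide (p.1 < q.1) || (!decide (q.1 < p.1) && decide (p.2.1 < q.2.1))

lemma pvSorted2_foldl (xs : List (Int × Int × Int)) :
    PySem.List.sorted2 xs (fun t => t.1) (fun t => t.2.1) =
      xs.foldl (fun acc x => PySem.List.insertBy pvBefore x acc) [] := rfl

lemma pvInsert_pairwise (x : Int × Int × Int) (ys : List (Int × Int × Int))
    (h : ys.Pairwise (fun p q => p.1 ≤ q.1)) :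
    (PySem.List.insertBy pvBefore x ys).Pairwise (fun p q => p.1 ≤ q.1) := by
  induction ys with
  | nil =>
    rw [PySem.List.insertBy_of_forall_not_before pvBefore x [] (by simp)]
    simp
  | cons y ys ih =>
    rw [List.pairwise_cons] at h
    by_cases hb : pvBefore x y = true
    · rw [show PySem.List.insertBy pvBefore x (y :: ys) = x :: y :: ys by
        simp [PySem.List.insertBy, hb]]
      have hxy : x.1 ≤ y.1 := by
        simp only [pvBefore, Bool.or_eq_true, Bool.and_eq_true, Bool.not_eq_true',
          decide_eq_true_eq, decide_eq_false_iff_not] at hb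
        rcases hb with hb | ⟨hb, _⟩ <;> omega
      rw [List.pairwise_cons]
      refine ⟨?_, List.pairwise_cons.mpr h⟩
      intro z hz
      rcases List.mem_cons.mp hz with hz | hz
      · subst hz; omega
      · have := h.1 z hz; omega
    · rw [show PySem.List.insertBy pvBefore x (y :: ys) =
          y :: PySem.List.insertBy pvBefore x ys by
        simp [PySem.List.insertBy, hb]]
      rw [List.pairwise_cons]
      refine ⟨?_, ih h.2⟩
      intro z hz
      rcases (PySem.List.insertBy_mem_iff pvBefore x z ys).mp hz with hz | hz
      · subst hz
        simp only [pvBefore, Bool.or_eq_true, Bool.and_eq_true, Bool.not_eq_true',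
          decide_eq_true_eq, decide_eq_false_iff_not] at hb
        push_neg at hb
        omega
      · exact h.1 z hz

lemma pvSorted2_pairwise (xs : List (Int × Int × Int)) :
    (PySem.List.sorted2 xs (fun t => t.1) (fun t => t.2.1)).Pairwise
      (fun p q => p.1 ≤ q.1) := by
  rw [pvSorted2_foldl]
  have haux : ∀ (l : List (Int × Int × Int)) (acc : List (Int × Int × Int)),
      acc.Pairwise (fun p q => p.1 ≤ q.1) →
      (l.foldl (fun acc x => PySem.List.insertBy pvBefore x acc) acc).Pairwise
        (fun p q => p.1 ≤ q.1) := by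
    intro l
    induction l with
    | nil => intro acc h; exact h
    | cons x l ih => intro acc h; exact ih _ (pvInsert_pairwise x acc h)
  exact haux xs [] (by simp)

lemma pvPairwise_lt_of_le_nodup :
    ∀ (l : List (Int × Int × Int)), l.Pairwise (fun p q => p.1 ≤ q.1) →
      (l.map (fun t => t.1)).Nodup → l.Pairwise (fun p q => p.1 < q.1) := by
  intro l
  induction l with
  | nil => intro _ _; simp
  | cons x l ih =>
    intro hle hnd
    rw [List.pairwise_cons] at hle
    rw [List.map_cons, List.nodup_cons] at hnd
    rw [List.pairwise_cons]
    refine ⟨?_, ih hle.2 hnd.2⟩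
    intro z hz
    have h1 := hle.1 z hz
    have h2 : x.1 ≠ z.1 := fun he => hnd.1 (he ▸ List.mem_map_of_mem hz)
    omega

theorem pvSorted2_eq (xs ys : List (Int × Int × Int)) (hperm : ys.Perm xs)
    (hp : ys.Pairwise (fun x y => x.1 < y.1)) :
    PySem.List.sorted2 xs (fun t => t.1) (fun t => t.2.1) = ys := by
  have hs2y : (PySem.List.sorted2 xs (fun t => t.1) (fun t => t.2.1)).Perm ys :=
    (PySem.List.sorted2_perm xs _ _ false).trans hperm.symm
  have hndyp : (ys.map (fun t => t.1)).Pairwise (· ≠ ·) :=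
    List.pairwise_map.mpr (hp.imp (fun h => ne_of_lt h))
  have hndy : (ys.map (fun t => t.1)).Nodup := hndyp
  have hnds : ((PySem.List.sorted2 xs (fun t => t.1) (fun t => t.2.1)).map
      (fun t => t.1)).Nodup := ((hs2y.map (fun t => t.1)).nodup_iff).mpr hndy
  have hslt := pvPairwise_lt_of_le_nodup _ (pvSorted2_pairwise xs) hnds
  exact List.Perm.eq_of_pairwise
    (le := fun p q => p.1 < q.1)
    (fun a c _ _ h1 h2 => absurd h2 (by omega)) hslt hp hs2y

-- ---------- gap folding (shared spine of both final proofs) ----------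

def pvGapStep (new : List String) (st : Int × Int × List (Int × Int × List String))
    (bl : Int × Int × Int) : Int × Int × List (Int × Int × List String) :=
  let hunks := if st.1 < bl.1 ∨ st.2.1 < bl.2.1 then
      st.2.2 ++ [(st.1, bl.1, PySem.List.slice new (some st.2.1) (some bl.2.1))]
    else st.2.2
  (bl.1 + bl.2.2, bl.2.1 + bl.2.2, hunks)

def pvGapOne (new : List String) (i j ei ej : Int) : List (Int × Int × List String) :=
  if i < ei ∨ j < ej then [(i, ei, PySem.List.slice new (some j) (some ej))] else []

-- the opcode fold's answer accumulator only grows by appending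
lemma pvOpcodes_acc (bs : List (Int × Int × Int)) :
    ∀ (i j : Int) (ans : List (String × Int × Int × Int × Int)),
      bs.foldl pvOpcodesStep (i, j, ans) =
        ((bs.foldl pvOpcodesStep (i, j, [])).1,
         (bs.foldl pvOpcodesStep (i, j, [])).2.1,
         ans ++ (bs.foldl pvOpcodesStep (i, j, [])).2.2) := by
  induction bs with
  | nil => intro i j ans; simp
  | cons b rest ih =>
    intro i j ans
    simp only [List.foldl_cons]
    rw [show pvOpcodesStep (i, j, ans) b =
          ((pvOpcodesStep (i, j, []) b).1, (pvOpcodesStep (i, j, []) b).2.1,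
           ans ++ (pvOpcodesStep (i, j, []) b).2.2) by
      simp only [pvOpcodesStep]; split_ifs <;> simp]
    rw [ih, ih ((pvOpcodesStep (i, j, []) b).1) ((pvOpcodesStep (i, j, []) b).2.1)
          ((pvOpcodesStep (i, j, []) b).2.2)]
    simp

-- the gap fold's hunks accumulator only grows by appending
lemma pvGap_acc (new : List String) (bs : List (Int × Int × Int)) :
    ∀ (i j : Int) (h : List (Int × Int × List String)),
      bs.foldl (pvGapStep new) (i, j, h) =
        ((bs.foldl (pvGapStep new) (i, j, [])).1,
         (bs.foldl (pvGapStep new) (i, j, [])).2.1,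
         h ++ (bs.foldl (pvGapStep new) (i, j, [])).2.2) := by
  induction bs with
  | nil => intro i j h; simp
  | cons b rest ih =>
    intro i j h
    simp only [List.foldl_cons]
    rw [show pvGapStep new (i, j, h) b =
          ((pvGapStep new (i, j, []) b).1, (pvGapStep new (i, j, []) b).2.1,
           h ++ (pvGapStep new (i, j, []) b).2.2) by
      simp only [pvGapStep]; split_ifs <;> simp]
    rw [ih, ih ((pvGapStep new (i, j, []) b).1) ((pvGapStep new (i, j, []) b).2.1)
          ((pvGapStep new (i, j, []) b).2.2)]
    simp

-- A's second loop distributes over its accumulator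
lemma pvHunk_acc (new : List String) (ops : List (String × Int × Int × Int × Int)) :
    ∀ (h : List (Int × Int × List String)),
      ops.foldl (pvHunkStep new) h = h ++ ops.foldl (pvHunkStep new) [] := by
  induction ops with
  | nil => intro h; simp
  | cons op rest ih =>
    intro h
    simp only [List.foldl_cons]
    rw [ih, ih (pvHunkStep new [] op)]
    simp only [pvHunkStep]
    split_ifs <;> simp

-- filtering A's opcodes equals the gap fold, for ANY block list and start state
lemma pvCore (new : List String) (bs : List (Int × Int × Int)) :
    ∀ (i j : Int),
      ((bs.foldl pvOpcodesStep (i, j, [])).2.2).foldl (pvHunkStep new) [] =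
        (bs.foldl (pvGapStep new) (i, j, [])).2.2 := by
  induction bs with
  | nil => intro i j; simp
  | cons b rest ih =>
    intro i j
    simp only [List.foldl_cons]
    rw [pvOpcodes_acc, pvGap_acc]
    rw [List.foldl_append, pvHunk_acc]
    have hstep : (pvOpcodesStep (i, j, []) b).1 = b.1 + b.2.2 ∧
        (pvOpcodesStep (i, j, []) b).2.1 = b.2.1 + b.2.2 ∧
        (pvGapStep new (i, j, []) b).1 = b.1 + b.2.2 ∧
        (pvGapStep new (i, j, []) b).2.1 = b.2.1 + b.2.2 := by
      constructor
      · simp only [pvOpcodesStep]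
      constructor
      · simp only [pvOpcodesStep]
      constructor
      · simp only [pvGapStep]
      · simp only [pvGapStep]
    rw [hstep.1, hstep.2.1, hstep.2.2.1, hstep.2.2.2, ih]
    congr 1
    simp only [pvOpcodesStep, pvGapStep]
    by_cases h1 : i < b.1 <;> by_cases h2 : j < b.2.1 <;> by_cases h3 : b.2.2 = 0 <;>
      simp [h1, h2, h3, pvHunkStep]

-- ---------- merging adjacent blocks never changes the gap fold ----------

lemma pvMergeAdj_acc :
    ∀ (bs : List (Int × Int × Int)) (cur : Int × Int × Int) (acc : List (Int × Int × Int)),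
      pvMergeAdj bs cur acc = acc ++ pvMergeAdj bs cur [] := by
  intro bs
  induction bs with
  | nil =>
    intro cur acc
    simp only [pvMergeAdj]
    split_ifs <;> simp
  | cons t rest ih =>
    intro cur acc
    obtain ⟨i2, j2, k2⟩ := t
    simp only [pvMergeAdj]
    split_ifs with h1 h2
    · exact ih _ acc
    · simp only [List.nil_append]
      rw [ih _ (acc ++ [cur]), ih _ [cur]]
      simp
    · exact ih _ acc

lemma pvMergeAdj_fold (new : List String) :
    ∀ (bs : List (Int × Int × Int)) (cur : Int × Int × Int)
      (tail : List (Int × Int × Int)) (st : Int × Int × List (Int × Int × List String)),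
      (∀ t ∈ bs, 1 ≤ t.2.2) →
      (1 ≤ cur.2.2 ∨ (cur.2.2 = 0 ∧ st.1 = cur.1 ∧ st.2.1 = cur.2.1)) →
      List.foldl (pvGapStep new) st (pvMergeAdj bs cur [] ++ tail) =
        List.foldl (pvGapStep new) st (cur :: bs ++ tail) := by
  intro bs
  induction bs with
  | nil =>
    intro cur tail st _ hcur
    obtain ⟨c1, c2, ck⟩ := cur
    obtain ⟨s1, s2, s3⟩ := st
    simp only [pvMergeAdj]
    rcases hcur with hcur | ⟨h0, h1, h2⟩
    · have hck : (1 : Int) ≤ ck := hcur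
      rw [if_pos (show ck ≠ 0 by omega)]
      first | rfl | simp
    · have h0' : ck = 0 := h0
      have h1' : s1 = c1 := h1
      have h2' : s2 = c2 := h2
      rw [if_neg (show ¬ ck ≠ 0 by omega)]
      simp only [List.nil_append, List.cons_append, List.foldl_cons]
      rw [show pvGapStep new (s1, s2, s3) (c1, c2, ck) = (s1, s2, s3) by
        simp only [pvGapStep]
        rw [if_neg (show ¬ (s1 < c1 ∨ s2 < c2) by omega)]
        exact Prod.ext (show c1 + ck = s1 by omega)
          (Prod.ext (show c2 + ck = s2 by omega) rfl)]
  | cons t rest ih =>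
    intro cur tail st hbs hcur
    obtain ⟨i2, j2, k2⟩ := t
    obtain ⟨c1, c2, ck⟩ := cur
    obtain ⟨s1, s2, s3⟩ := st
    have hck : (1 : Int) ≤ ck ∨ (ck = 0 ∧ s1 = c1 ∧ s2 = c2) := hcur
    have hk2 : (1 : Int) ≤ k2 := by simpa using hbs (i2, j2, k2) (by simp)
    have hrest : ∀ t ∈ rest, 1 ≤ t.2.2 := fun t ht => hbs t (by simp [ht])
    simp only [pvMergeAdj]
    split_ifs with h1 h2
    · -- adjacent: merge cur with (i2, j2, k2)
      have he1 : c1 + ck = i2 := h1.1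
      have he2 : c2 + ck = j2 := h1.2
      rw [ih (c1, c2, ck + k2) tail (s1, s2, s3) hrest
        (by left; show (1 : Int) ≤ ck + k2; rcases hck with h | h <;> omega)]
      simp only [List.cons_append, List.foldl_cons]
      congr 1
      simp only [pvGapStep]
      rw [if_neg (show ¬ (c1 + ck < i2 ∨ c2 + ck < j2) by omega)]
      exact Prod.ext (show c1 + (ck + k2) = i2 + k2 by omega)
        (Prod.ext (show c2 + (ck + k2) = j2 + k2 by omega) rfl)
    · -- cur is kept, continue with (i2, j2, k2)
      simp only [List.nil_append]
      rw [pvMergeAdj_acc]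
      simp only [List.append_assoc, List.singleton_append, List.cons_append, List.foldl_cons,
        List.nil_append]
      rw [ih (i2, j2, k2) tail (pvGapStep new (s1, s2, s3) (c1, c2, ck)) hrest (Or.inl hk2)]
      simp only [List.cons_append, List.foldl_cons]
    · -- cur is the still-zero initial block: dropping it is a no-op
      have hck0 : ck = 0 := not_not.mp h2
      rcases hck with hc | ⟨h0, hst1, hst2⟩
      · omega
      · have hno : pvGapStep new (s1, s2, s3) (c1, c2, ck) = (s1, s2, s3) := by
          simp only [pvGapStep]
          rw [if_neg (show ¬ (s1 < c1 ∨ s2 < c2) by omega)]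
          exact Prod.ext (show c1 + ck = s1 by omega)
            (Prod.ext (show c2 + ck = s2 by omega) rfl)
        rw [ih (i2, j2, k2) tail (s1, s2, s3) hrest (Or.inl hk2)]
        simp only [List.cons_append, List.foldl_cons, hno]

lemma pvGapFold_rec (a b : List String) :
    ∀ (alo ahi blo bhi : Int),
      (List.foldl (pvGapStep b) (alo, blo, []) (pvRecBlocks a b alo ahi blo bhi)).2.2 ++
        pvGapOne b (List.foldl (pvGapStep b) (alo, blo, []) (pvRecBlocks a b alo ahi blo bhi)).1
          (List.foldl (pvGapStep b) (alo, blo, []) (pvRecBlocks a b alo ahi blo bhi)).2.1 ahi bhi =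
      pvRecHunks a b alo ahi blo bhi := by
  intro alo ahi blo bhi
  rw [pvRecBlocks, pvRecHunks]
  rcases pvBruteMatch_ok a b alo ahi blo bhi with h | h
  · simp only [h]
    simp [pvGapOne]
  · have h0 : ¬ (pvBruteMatch a b alo ahi blo bhi).2.2 = 0 := by omega
    simp only [h0, if_false]
    have ihl := pvGapFold_rec a b alo (pvBruteMatch a b alo ahi blo bhi).1 blo
      (pvBruteMatch a b alo ahi blo bhi).2.1
    have ihr := pvGapFold_rec a b
      ((pvBruteMatch a b alo ahi blo bhi).1 + (pvBruteMatch a b alo ahi blo bhi).2.2) ahi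
      ((pvBruteMatch a b alo ahi blo bhi).2.1 + (pvBruteMatch a b alo ahi blo bhi).2.2) bhi
    set m := pvBruteMatch a b alo ahi blo bhi with hm
    set L := pvRecBlocks a b alo m.1 blo m.2.1 with hL
    set R := pvRecBlocks a b (m.1 + m.2.2) ahi (m.2.1 + m.2.2) bhi with hR
    set FL := List.foldl (pvGapStep b) (alo, blo, []) L with hFL
    set FR := List.foldl (pvGapStep b) (m.1 + m.2.2, m.2.1 + m.2.2, []) R with hFR
    rw [List.foldl_append, List.foldl_cons]
    rw [show pvGapStep b FL m =
          (m.1 + m.2.2, m.2.1 + m.2.2, FL.2.2 ++ pvGapOne b FL.1 FL.2.1 m.1 m.2.1) by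
      simp only [pvGapStep, pvGapOne]
      split_ifs <;> simp]
    rw [pvGap_acc b R (m.1 + m.2.2) (m.2.1 + m.2.2)
      (FL.2.2 ++ pvGapOne b FL.1 FL.2.1 m.1 m.2.1)]
    rw [← hFR]
    simp only [List.append_assoc]
    rw [ihr, ← List.append_assoc, ihl]
termination_by alo ahi blo bhi => ((ahi - alo) + (bhi - blo)).toNat
decreasing_by
  all_goals rcases pvBruteMatch_ok a b alo ahi blo bhi with h | h
  · rw [h] at h0; simp at h0
  · omega
  · rw [h] at h0; simp at h0
  · omega

-- ===== VERDICT (by name: the statement is the Claim_ definition above) =====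
theorem diff_hunks_py_spec : Claim_equal_diff_hunks_py := by
  intro old new _
  unfold Spec_diff_hunks_py diff_hunks_py diff_hunks_py_alt
  show (((pvMatchingBlocks old new).foldl pvOpcodesStep (0, 0, [])).2.2).foldl
      (pvHunkStep new) [] = pvRecHunks old new 0 (old.length : Int) 0 (new.length : Int)
  rw [pvCore new (pvMatchingBlocks old new) 0 0]
  have hfuel : (([((0 : Int), (old.length : Int), (0 : Int), (new.length : Int))] :
      List (Int × Int × Int × Int)).map
      (fun R => pvNC old new R.1 R.2.1 R.2.2.1 R.2.2.2)).sum ≤ 2 * old.length + 2 := by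
    have h1 := pvNC_le old new 0 (old.length : Int) 0 (new.length : Int)
    simp only [List.map_cons, List.map_nil, List.sum_cons, List.sum_nil]
    omega
  have hperm := pvGmbLoop_perm old new (2 * old.length + 2)
    [(0, (old.length : Int), 0, (new.length : Int))] []
    (by
      intro R hR
      rcases List.mem_singleton.mp hR with rfl
      exact ⟨le_refl _, le_refl _, le_refl _, le_refl _⟩)
    hfuel
  simp only [List.flatMap_cons, List.flatMap_nil, List.append_nil, List.nil_append] at hperm
  have hsort := pvSorted2_eq
    (pvGmbLoop old new (pvB2J new) (2 * old.length + 2) [(0, (old.length : Int), 0, (new.length : Int))] [])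
    (pvRecBlocks old new 0 (old.length : Int) 0 (new.length : Int))
    hperm.symm (pvRecBlocks_pairwise old new 0 (old.length : Int) 0 (new.length : Int))
  rw [show pvMatchingBlocks old new =
      pvMergeAdj (PySem.List.sorted2
        (pvGmbLoop old new (pvB2J new) (2 * old.length + 2) [(0, (old.length : Int), 0, (new.length : Int))] [])
        (fun t => t.1) (fun t => t.2.1)) (0, 0, 0) [] ++ [((old.length : Int), (new.length : Int), 0)] from rfl]
  rw [hsort]
  rw [pvMergeAdj_fold new (pvRecBlocks old new 0 (old.length : Int) 0 (new.length : Int)) (0, 0, 0)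
    [((old.length : Int), (new.length : Int), 0)] (0, 0, [])
    (fun t ht => (pvRecBlocks_bounds old new 0 (old.length : Int) 0 (new.length : Int) t ht).2.2.2.2)
    (Or.inr ⟨rfl, rfl, rfl⟩)]
  simp only [List.cons_append, List.foldl_cons]
  rw [show pvGapStep new (0, 0, []) (0, 0, 0) =
      ((0 : Int), (0 : Int), ([] : List (Int × Int × List String))) from by
    simp [pvGapStep]]
  rw [List.foldl_append]
  simp only [List.foldl_cons, List.foldl_nil]
  rw [show pvGapStep new
        (List.foldl (pvGapStep new) (0, 0, []) (pvRecBlocks old new 0 (old.length : Int) 0 (new.length : Int)))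
        ((old.length : Int), (new.length : Int), 0) =
      ((old.length : Int) + 0, (new.length : Int) + 0,
        (List.foldl (pvGapStep new) (0, 0, []) (pvRecBlocks old new 0 (old.length : Int) 0 (new.length : Int))).2.2 ++
          pvGapOne new
            (List.foldl (pvGapStep new) (0, 0, []) (pvRecBlocks old new 0 (old.length : Int) 0 (new.length : Int))).1
            (List.foldl (pvGapStep new) (0, 0, []) (pvRecBlocks old new 0 (old.length : Int) 0 (new.length : Int))).2.1
            (old.length : Int) (new.length : Int)) from by
    simp only [pvGapStep, pvGapOne]
    split_ifs <;> simp]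
  exact pvGapFold_rec old new 0 (old.length : Int) 0 (new.length : Int)
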